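-- pv_equiv track=rewrite | github.com/Big-E-Green/Electron-phonon_GF_Feynman_Diagrams | el_ph_genFunctions.py | genall2
-- ===== SOURCE A (Python) =====
-- def genall2(n):
--     One=[]
--     c=0
--     while n>=c:
--         g=str(c)+str(c)
--         One.append(str(g))
--         f=str(c)+'p'
--         One.append(str(f))
--         c+=1
--     One.remove('0p')
--     One.remove('00')
--     chunkii=[]
--     for x in range(0, len(One), 2):
--         chunkii.append(One[x:x+2])
--     return chunkii
-- ===== SOURCE B (Python) =====
-- def genall2(n):
--     return [[str(c) + str(c), str(c) + "p"] for c in range(1, n + 1)]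
-- ===== Notes on version B (the rewrite author's own statement) =====
-- stated objective: simpler
-- what changed: B builds the chunked pair list directly with a single comprehension over the counter range, replacing A's while loop that grows a flat string list, the two sentinel remove() calls that strip the initial entries, and the separate index-slice re-chunking loop.
-- crash fix: On negative n, A raises ValueError (remove('0p') on the empty flat list) while B returns []. — e.g. on genall2(-1): A raises ValueError, B returns []
import Mathlib
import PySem

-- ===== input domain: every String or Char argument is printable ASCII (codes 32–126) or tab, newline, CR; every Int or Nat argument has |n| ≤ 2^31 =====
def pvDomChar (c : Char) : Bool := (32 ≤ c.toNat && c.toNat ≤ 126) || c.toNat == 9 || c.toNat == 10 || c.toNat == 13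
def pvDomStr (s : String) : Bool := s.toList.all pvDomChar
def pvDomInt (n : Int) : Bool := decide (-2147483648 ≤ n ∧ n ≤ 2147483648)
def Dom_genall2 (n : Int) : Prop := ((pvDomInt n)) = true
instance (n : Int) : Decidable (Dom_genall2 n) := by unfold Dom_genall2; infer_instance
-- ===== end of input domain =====

-- B replaces A's flat-list-build + sentinel removes + re-chunking loop by one direct
-- comprehension over 1..n (simpler); on n < 0 A raises ValueError, B returns [].


-- ===== PORT A =====
-- the while loop: grows the flat list One while n >= c
def genall2_loop (n c : Int) (One : List String) : List String :=
  if _h : n ≥ c then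
    genall2_loop n (c + 1)
      ((One ++ [PySem.Int.toStr c ++ PySem.Int.toStr c]) ++ [PySem.Int.toStr c ++ "p"])
  else One
termination_by (n + 1 - c).toNat
decreasing_by omega

def genall2 (n : Int) : List (List String) :=
  -- One = genall2_loop n 0 []; One.remove('0p'); One.remove('00')
  match PySem.List.remove? (genall2_loop n 0 []) "0p" with
  | none => []  -- Python: ValueError (n < 0); outside Pre_genall2
  | some One1 =>
    match PySem.List.remove? One1 "00" with
    | none => []  -- unreachable
    | some One2 =>
      (PySem.List.pyRange 0 (One2.length : Int) 2).foldl
        (fun chunkii x => chunkii ++ [PySem.List.slice One2 (some x) (some (x + 2))]) []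

-- ===== PORT B =====
def genall2_alt (n : Int) : List (List String) :=
  (PySem.List.pyRange 1 (n + 1) 1).map
    (fun c => [PySem.Int.toStr c ++ PySem.Int.toStr c, PySem.Int.toStr c ++ "p"])

-- ===== PRECONDITION & SPEC =====
-- Pre_ excludes exactly n < 0, where A raises ValueError (remove on the empty list).
def Pre_genall2 (n : Int) : Prop := 0 ≤ n
instance (n : Int) : Decidable (Pre_genall2 n) := by unfold Pre_genall2; infer_instance
def pvWitness_genall2 : Int := 2

-- On n < 0, A raises ValueError (remove('0p') on the empty flat list) while B returns [].
def Raises_genall2 (n : Int) : Prop := n < 0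
instance (n : Int) : Decidable (Raises_genall2 n) := by unfold Raises_genall2; infer_instance
def pvRaiseWitness_genall2 : Int := -1
def pvRaiseWitnessOut_genall2 : List (List String) := []

def Spec_genall2 (n : Int) (out : List (List String)) : Prop := out = genall2_alt n
instance (n : Int) (out : List (List String)) : Decidable (Spec_genall2 n out) := by unfold Spec_genall2; infer_instance

-- ===== CLAIM (what is proved, stated in full; the proofs are below) =====
def Claim_equal_genall2 : Prop := ∀ (n : Int), Dom_genall2 n → Pre_genall2 n → Spec_genall2 n (genall2 n)
def Claim_raises_genall2 : Prop := (∀ (n : Int), Dom_genall2 n → Raises_genall2 n → ¬ Pre_genall2 n) ∧ (Dom_genall2 (pvRaiseWitness_genall2) ∧ Raises_genall2 (pvRaiseWitness_genall2) ∧ genall2_alt (pvRaiseWitness_genall2) = pvRaiseWitnessOut_genall2)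

-- ===== LEMMAS AND PROOFS =====

-- the pair of strings A appends for counter value c (proof abbreviation only)
def pvPair (c : Int) : List String :=
  [PySem.Int.toStr c ++ PySem.Int.toStr c, PySem.Int.toStr c ++ "p"]

theorem genall2_loop_eq (n c : Int) (acc : List String) :
    genall2_loop n c acc = acc ++ (PySem.List.pyRange c (n + 1) 1).flatMap pvPair := by
  induction c, acc using genall2_loop.induct n with
  | case1 c acc h ih =>
    rw [genall2_loop, dif_pos h, ih, PySem.List.pyRange_one_cons (by omega : c < n + 1)]
    simp [pvPair]
  | case2 c acc h =>
    rw [genall2_loop, dif_neg h, PySem.List.pyRange_one_eq_nil (by omega)]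
    simp

-- step-2 range unrolls one element
theorem pyRange_two_cons (a b : Int) (h : a < b) :
    PySem.List.pyRange a b 2 = a :: PySem.List.pyRange (a + 2) b 2 := by
  rw [PySem.List.pyRange_of_pos _ _ (by norm_num : (0:Int) < 2),
      PySem.List.pyRange_of_pos _ _ (by norm_num : (0:Int) < 2), if_pos h]
  by_cases h2 : a + 2 < b
  · rw [if_pos h2]
    have hc : ((b - a + 2 - 1) / 2).toNat = ((b - (a + 2) + 2 - 1) / 2).toNat + 1 := by omega
    rw [hc, List.range_succ_eq_map, List.map_cons, List.map_map]
    congr 1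
    · simp
    · apply List.map_congr_left
      intro k _
      simp [Function.comp]
      ring
  · rw [if_neg h2]
    have hc : ((b - a + 2 - 1) / 2).toNat = 1 := by omega
    rw [hc]
    simp

-- A's re-chunking loop undoes the flattening of length-2 chunks
theorem chunk_go (ps : List (List String)) (L : List String) (j : Nat)
    (acc : List (List String))
    (hlen : ∀ p ∈ ps, p.length = 2)
    (hdrop : L.drop j = ps.flatMap id) :
    (PySem.List.pyRange (j : Int) (L.length : Int) 2).foldl
      (fun a x => a ++ [PySem.List.slice L (some x) (some (x + 2))]) acc = acc ++ ps := by
  induction ps generalizing j acc with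
  | nil =>
    have hj : L.length ≤ j := by
      have := congrArg List.length hdrop
      simp at this; omega
    rw [PySem.List.pyRange_of_pos _ _ (by norm_num : (0:Int) < 2),
        if_neg (not_lt.mpr (by exact_mod_cast hj))]
    simp
  | cons p ps ih =>
    have hp2 : p.length = 2 := hlen p (by simp)
    have hL : j + 2 ≤ L.length := by
      have := congrArg List.length hdrop
      simp [hp2] at this; omega
    rw [pyRange_two_cons _ _ (by exact_mod_cast (by omega : j < L.length)), List.foldl_cons]
    have hslice : PySem.List.slice L (some (j : Int)) (some ((j : Int) + 2)) = p := by
      have h2 : ((j : Int) + 2) = (j : Int) + ((2 : Nat) : Int) := by norm_num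
      rw [h2, PySem.List.slice_natCast_add, hdrop, List.flatMap_cons]
      simp only [id_eq]
      rw [← hp2, List.take_left]
    rw [hslice]
    have hcast : (j : Int) + 2 = ((j + 2 : Nat) : Int) := by push_cast; ring
    have hdrop' : L.drop (j + 2) = ps.flatMap id := by
      have : L.drop (j + 2) = (L.drop j).drop 2 := by rw [List.drop_drop]
      rw [this, hdrop, List.flatMap_cons]
      simp only [id_eq]
      rw [← hp2, List.drop_left]
    rw [hcast, ih (j + 2) (acc ++ [p]) (fun q hq => hlen q (by simp [hq])) hdrop']
    simp

theorem genall2_spec : Claim_equal_genall2 := by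
  intro n _ hn
  unfold Spec_genall2 genall2 genall2_alt
  have hOne : genall2_loop n 0 [] =
      "00" :: "0p" :: ((PySem.List.pyRange 1 (n + 1) 1).flatMap pvPair) := by
    rw [genall2_loop_eq, PySem.List.pyRange_one_cons (by unfold Pre_genall2 at hn; omega : (0:Int) < n + 1),
        List.flatMap_cons]
    rfl
  rw [hOne]
  set rest := (PySem.List.pyRange 1 (n + 1) 1).flatMap pvPair with hrest
  have h1 : PySem.List.remove? ("00" :: "0p" :: rest) "0p" = some ("00" :: rest) := by
    rw [PySem.List.remove?_cons_of_ne _ (by decide : ("00":String) ≠ "0p"),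
        PySem.List.remove?_cons_self]
    rfl
  rw [h1]
  dsimp only
  have h2 : PySem.List.remove? ("00" :: rest) "00" = some rest :=
    PySem.List.remove?_cons_self _ _
  rw [h2]
  dsimp only
  have hps : rest = ((PySem.List.pyRange 1 (n + 1) 1).map pvPair).flatMap id := by
    rw [hrest, List.flatMap_map]
    rfl
  have := chunk_go ((PySem.List.pyRange 1 (n + 1) 1).map pvPair) rest 0 []
    (by intro p hp; rw [List.mem_map] at hp; obtain ⟨c, _, rfl⟩ := hp; rfl)
    (by simpa using hps)
  simpa using this

-- ===== VERDICT (by name: the statement is the Claim_ definition above) =====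
theorem genall2_raises : Claim_raises_genall2 := by
  unfold Claim_raises_genall2
  exact ⟨by intro n _ h; unfold Raises_genall2 Pre_genall2 at *; omega, by decide⟩

-- witness self-check: B's port really returns [] at the raise witness
theorem genall2_raises_witness_ok :
    genall2_alt pvRaiseWitness_genall2 = pvRaiseWitnessOut_genall2 :=
  genall2_raises.2.2.2
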